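-- pv_equiv track=rewrite | github.com/ngocuong0105/usaco | silver/moocast.py | solve
-- ===== SOURCE A (Python) =====
-- from collections import defaultdict
-- from typing import Any
--
-- def solve(inp) -> Any:
--     def dfs(x,y):
--         visited.add((x,y))
--         for u,v in adj[x,y]:
--             if (u,v) not in visited:
--                 dfs(u,v)
--     cows = inp
--     adj = defaultdict(list)
--     for i in range (len(cows)):
--         x,y,p = cows[i]
--         for j in range(len(cows)):
--             a,b,_ = cows[j]
--             if p**2 >= (x-a)**2 + (y-b)**2:
--                 adj[x,y].append((a,b))
--     res = 0
--     for x,y,_ in cows: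
--         visited = set()
--         dfs(x,y)
--         res = max(res,len(visited))
--     return res
-- ===== SOURCE B (Python) =====
-- def solve(inp):
--     cows = inp
--     nodes = list(dict.fromkeys([(x, y) for x, y, _ in cows]))
--     nbr = {}
--     for x, y, p in cows:
--         cur = nbr.get((x, y), [])
--         nbr[(x, y)] = cur + [q for q in nodes if p * p >= (x - q[0]) ** 2 + (y - q[1]) ** 2]
--     best = 0
--     for s in nodes:
--         reach = {s}
--         frontier = [s]
--         while frontier:
--             nxt = []
--             for r in frontier:
--                 for t in nbr.get(r, []):
--                     if t not in reach:
--                         reach.add(t)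
--                         nxt.append(t)
--             frontier = nxt
--         best = max(best, len(reach))
--     return best
-- ===== Notes on version B (the rewrite author's own statement) =====
-- stated objective: faster
-- what changed: Replaces the per-cow recursive DFS over a defaultdict keyed by raw coordinates with: dedup of positions up front, one adjacency list per distinct position, and an iterative frontier BFS per distinct start node (no recursion, duplicate positions processed once).
import Mathlib
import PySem

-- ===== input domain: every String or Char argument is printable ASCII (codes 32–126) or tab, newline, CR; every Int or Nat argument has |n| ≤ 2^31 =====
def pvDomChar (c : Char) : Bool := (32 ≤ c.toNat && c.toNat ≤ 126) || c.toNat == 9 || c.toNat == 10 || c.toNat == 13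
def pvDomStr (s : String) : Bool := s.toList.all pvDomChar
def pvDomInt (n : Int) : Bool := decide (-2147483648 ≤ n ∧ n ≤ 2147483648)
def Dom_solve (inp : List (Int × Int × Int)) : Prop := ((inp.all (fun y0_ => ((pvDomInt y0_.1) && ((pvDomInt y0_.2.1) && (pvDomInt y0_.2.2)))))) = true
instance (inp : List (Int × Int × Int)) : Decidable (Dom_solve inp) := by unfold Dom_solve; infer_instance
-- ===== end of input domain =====

-- B replaces A's per-cow recursive DFS with dedup of positions + an iterative frontier BFS
-- per distinct position (return value only; neither program mutates its argument).

-- ===== PORT A =====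
-- adj = defaultdict(list); double loop over cows appending reachable positions
def pvAdjA (cows : List (Int × Int × Int)) : PySem.Dict (Int × Int) (List (Int × Int)) :=
  cows.foldl (fun adj ci =>
    cows.foldl (fun adj cj =>
      if ci.2.2 ^ 2 ≥ (ci.1 - cj.1) ^ 2 + (ci.2.1 - cj.2.1) ^ 2 then
        adj.insert (ci.1, ci.2.1) (adj.getD (ci.1, ci.2.1) [] ++ [(cj.1, cj.2.1)])
      else adj) adj) PySem.Dict.empty

-- recursive dfs; the Nat argument is a totality guard only (the recursion depth is
-- bounded by the number of distinct positions, see pvDfs_main below)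
def pvDfs (adj : PySem.Dict (Int × Int) (List (Int × Int))) :
    Nat → (Int × Int) → PySem.Set (Int × Int) → PySem.Set (Int × Int)
  | 0, _, visited => visited
  | fuel + 1, xy, visited =>
      (adj.getD xy []).foldl
        (fun vis uv => if uv ∈ vis then vis else pvDfs adj fuel uv vis)
        (PySem.Set.add visited xy)

def solve (inp : List (Int × Int × Int)) : Int :=
  let cows := inp
  let adj := pvAdjA cows
  cows.foldl (fun res c =>
    let visited := pvDfs adj (cows.length + 1) (c.1, c.2.1) PySem.Set.empty
    max res (PySem.List.len visited)) 0

-- ===== PORT B =====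
-- nbr: adjacency per distinct position, built once
def pvNbrB (cows : List (Int × Int × Int)) (nodes : List (Int × Int)) :
    PySem.Dict (Int × Int) (List (Int × Int)) :=
  cows.foldl (fun nbr c =>
    nbr.insert (c.1, c.2.1)
      (nbr.getD (c.1, c.2.1) [] ++
        nodes.filter (fun q => c.2.2 * c.2.2 ≥ (c.1 - q.1) ^ 2 + (c.2.1 - q.2) ^ 2)))
    PySem.Dict.empty

-- one round of the while loop: expand every frontier node, collecting the fresh ones
def pvBfsRound (nbr : PySem.Dict (Int × Int) (List (Int × Int))) (frontier : List (Int × Int))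
    (reach : PySem.Set (Int × Int)) : PySem.Set (Int × Int) × List (Int × Int) :=
  frontier.foldl (fun st r =>
    (nbr.getD r []).foldl
      (fun st t => if t ∈ st.1 then st else (PySem.Set.add st.1 t, st.2 ++ [t]))
      st) (reach, [])

-- while frontier: …; the Nat argument is a totality guard only (reach grows every round)
def pvBfs (nbr : PySem.Dict (Int × Int) (List (Int × Int))) :
    Nat → List (Int × Int) → PySem.Set (Int × Int) → PySem.Set (Int × Int)
  | 0, _, reach => reach
  | fuel + 1, frontier, reach =>
      match frontier with
      | [] => reach
      | _ :: _ =>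
          let st := pvBfsRound nbr frontier reach
          pvBfs nbr fuel st.2 st.1

def solve_alt (inp : List (Int × Int × Int)) : Int :=
  let cows := inp
  let nodes := PySem.List.dedup (cows.map (fun c => (c.1, c.2.1)))
  let nbr := pvNbrB cows nodes
  nodes.foldl (fun best s =>
    let reach := pvBfs nbr (nodes.length + 1) [s] (PySem.Set.add PySem.Set.empty s)
    max best (PySem.List.len reach)) 0

-- ===== PRECONDITION & SPEC =====
def Spec_solve (inp : List (Int × Int × Int)) (out : Int) : Prop := out = solve_alt inp
instance (inp : List (Int × Int × Int)) (out : Int) : Decidable (Spec_solve inp out) := by unfold Spec_solve; infer_instance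

-- ===== CLAIM (what is proved, stated in full; the proofs are below) =====
def Claim_equal_solve : Prop := ∀ (inp : List (Int × Int × Int)), Dom_solve inp → Spec_solve inp (solve inp)

-- ===== LEMMAS AND PROOFS =====

-- the position of a cow
def pvPosOf (c : Int × Int × Int) : Int × Int := (c.1, c.2.1)

-- reachability in the graph whose edges are given by the adjacency dict
def pvRTG (adj : PySem.Dict (Int × Int) (List (Int × Int))) (x w : Int × Int) : Prop :=
  Relation.ReflTransGen (fun a b => b ∈ adj.getD a []) x w

-- reachability avoiding an already-visited set (every node after the start is fresh)
def pvRA (adj : PySem.Dict (Int × Int) (List (Int × Int))) (vis : List (Int × Int))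
    (x w : Int × Int) : Prop :=
  Relation.ReflTransGen (fun a b => b ∈ adj.getD a [] ∧ b ∉ vis) x w

-- every adjacency target lies in U
def pvGood (adj : PySem.Dict (Int × Int) (List (Int × Int))) (U : List (Int × Int)) : Prop :=
  ∀ a : Int × Int, ∀ b ∈ adj.getD a [], b ∈ U

-- counting lemmas for the fuel bound
theorem pv_filter_le (U v v' : List (Int × Int))
    (h : ∀ x ∈ v, x ∈ v') :
    (U.filter (fun u => u ∉ v')).length ≤ (U.filter (fun u => u ∉ v)).length := by
  induction U with
  | nil => simp
  | cons u U ih =>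
    simp only [List.filter_cons]
    by_cases h2 : u ∈ v
    · have h1 : u ∈ v' := h u h2
      rw [if_neg (by simp [h1]), if_neg (by simp [h2])]
      exact ih
    · by_cases h1 : u ∈ v'
      · rw [if_neg (by simp [h1]), if_pos (by simp [h2])]
        simp only [List.length_cons]
        omega
      · rw [if_pos (by simp [h1]), if_pos (by simp [h2])]
        simp only [List.length_cons]
        omega

theorem pv_filter_lt (U v v' : List (Int × Int))
    (h : ∀ x ∈ v, x ∈ v') (x : Int × Int) (hxU : x ∈ U) (hxv : x ∉ v) (hxv' : x ∈ v') :
    (U.filter (fun u => u ∉ v')).length < (U.filter (fun u => u ∉ v)).length := by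
  induction U with
  | nil => cases hxU
  | cons u U ih =>
    simp only [List.filter_cons]
    rcases List.mem_cons.mp hxU with rfl | hxU'
    · rw [if_neg (by simp [hxv']), if_pos (by simp [hxv])]
      simp only [List.length_cons]
      have := pv_filter_le U v v' h
      omega
    · by_cases h2 : u ∈ v
      · have h1 : u ∈ v' := h u h2
        rw [if_neg (by simp [h1]), if_neg (by simp [h2])]
        exact ih hxU'
      · by_cases h1 : u ∈ v'
        · rw [if_neg (by simp [h1]), if_pos (by simp [h2])]
          simp only [List.length_cons]
          have := ih hxU'
          omega
        · rw [if_pos (by simp [h1]), if_pos (by simp [h2])]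
          simp only [List.length_cons]
          have := ih hxU'
          omega

-- the DFS loop invariant (inner foldl)
theorem pvDfs_fold (adj : PySem.Dict (Int × Int) (List (Int × Int))) (U : List (Int × Int))
    (hU : pvGood adj U) (fuel : Nat)
    (IH : ∀ (xy : Int × Int) (vis : List (Int × Int)), vis.Nodup → xy ∈ U → xy ∉ vis →
      (U.filter (fun u => u ∉ vis)).length < fuel →
      (pvDfs adj fuel xy vis).Nodup ∧
      (∀ v ∈ vis, v ∈ pvDfs adj fuel xy vis) ∧
      xy ∈ pvDfs adj fuel xy vis ∧
      (∀ w ∈ pvDfs adj fuel xy vis, w ∈ vis ∨ pvRA adj vis xy w) ∧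
      (∀ a ∈ pvDfs adj fuel xy vis, a ∉ vis → ∀ b ∈ adj.getD a [], b ∈ pvDfs adj fuel xy vis))
    (xy : Int × Int) (vis : List (Int × Int)) (hxyU : xy ∈ U) (_hxyv : xy ∉ vis) :
    ∀ (l : List (Int × Int)) (v0 : List (Int × Int)),
      (∀ uv ∈ l, uv ∈ adj.getD xy []) →
      v0.Nodup → (∀ x ∈ vis, x ∈ v0) → xy ∈ v0 →
      (∀ w ∈ v0, w ∈ vis ∨ pvRA adj vis xy w) →
      (∀ a ∈ v0, a ∉ vis → a = xy ∨ ∀ b ∈ adj.getD a [], b ∈ v0) →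
      (U.filter (fun u => u ∉ v0)).length < fuel →
      (l.foldl (fun vis uv => if uv ∈ vis then vis else pvDfs adj fuel uv vis) v0).Nodup ∧
      (∀ x ∈ v0, x ∈ l.foldl (fun vis uv => if uv ∈ vis then vis else pvDfs adj fuel uv vis) v0) ∧
      (∀ w ∈ l.foldl (fun vis uv => if uv ∈ vis then vis else pvDfs adj fuel uv vis) v0,
        w ∈ vis ∨ pvRA adj vis xy w) ∧
      (∀ a ∈ l.foldl (fun vis uv => if uv ∈ vis then vis else pvDfs adj fuel uv vis) v0,
        a ∉ vis → a = xy ∨ ∀ b ∈ adj.getD a [],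
          b ∈ l.foldl (fun vis uv => if uv ∈ vis then vis else pvDfs adj fuel uv vis) v0) ∧
      (∀ uv ∈ l, uv ∈ l.foldl (fun vis uv => if uv ∈ vis then vis else pvDfs adj fuel uv vis) v0) ∧
      (U.filter (fun u =>
        u ∉ l.foldl (fun vis uv => if uv ∈ vis then vis else pvDfs adj fuel uv vis) v0)).length < fuel := by
  intro l
  induction l with
  | nil =>
    intro v0 hl h1 h2 h3 h4 h5 h6
    exact ⟨h1, fun x hx => hx, h4, fun a ha hav => (h5 a ha hav).elim
      (fun he => Or.inl he) (fun hs => Or.inr hs), fun uv huv => absurd huv (List.not_mem_nil),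
      h6⟩
  | cons uv l ih =>
    intro v0 hl h1 h2 h3 h4 h5 h6
    simp only [List.foldl_cons]
    by_cases hu : uv ∈ v0
    · have hstep : (if uv ∈ v0 then v0 else pvDfs adj fuel uv v0) = v0 := if_pos hu
      simp only [hstep]
      obtain ⟨g1, g2, g3, g4, g5, g6⟩ := ih v0 (fun x hx => hl x (List.mem_cons_of_mem uv hx))
        h1 h2 h3 h4 h5 h6
      refine ⟨g1, g2, g3, g4, ?_, g6⟩
      intro x hx
      rcases List.mem_cons.mp hx with rfl | hx'
      · exact g2 x hu
      · exact g5 x hx'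
    · have hstep : (if uv ∈ v0 then v0 else pvDfs adj fuel uv v0) = pvDfs adj fuel uv v0 :=
        if_neg hu
      simp only [hstep]
      have huU : uv ∈ U := hU xy uv (hl uv List.mem_cons_self)
      obtain ⟨d1, d2, d3, d4, d5⟩ := IH uv v0 h1 huU hu h6
      have h2' : ∀ x ∈ vis, x ∈ pvDfs adj fuel uv v0 := fun x hx => d2 x (h2 x hx)
      have h3' : xy ∈ pvDfs adj fuel uv v0 := d2 xy h3
      have h4' : ∀ w ∈ pvDfs adj fuel uv v0, w ∈ vis ∨ pvRA adj vis xy w := by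
        intro w hw
        rcases d4 w hw with hwv0 | hra
        · exact h4 w hwv0
        · right
          have hedge : uv ∈ adj.getD xy [] := hl uv List.mem_cons_self
          have hunv : uv ∉ vis := fun hc => hu (h2 uv hc)
          exact Relation.ReflTransGen.head ⟨hedge, hunv⟩
            (hra.mono (fun a b hab => ⟨hab.1, fun hc => hab.2 (h2 b hc)⟩))
      have h5' : ∀ a ∈ pvDfs adj fuel uv v0, a ∉ vis →
          a = xy ∨ ∀ b ∈ adj.getD a [], b ∈ pvDfs adj fuel uv v0 := by
        intro a ha hav
        by_cases hav0 : a ∈ v0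
        · rcases h5 a hav0 hav with he | hs
          · exact Or.inl he
          · exact Or.inr (fun b hb => d2 b (hs b hb))
        · exact Or.inr (fun b hb => d5 a ha hav0 b hb)
      have h6' : (U.filter (fun u => u ∉ pvDfs adj fuel uv v0)).length < fuel :=
        lt_of_le_of_lt (pv_filter_le U v0 (pvDfs adj fuel uv v0) d2) h6
      obtain ⟨g1, g2, g3, g4, g5, g6⟩ := ih (pvDfs adj fuel uv v0)
        (fun x hx => hl x (List.mem_cons_of_mem uv hx)) d1 h2' h3' h4' h5' h6'
      refine ⟨g1, fun x hx => g2 x (d2 x hx), g3, g4, ?_, g6⟩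
      intro x hx
      rcases List.mem_cons.mp hx with rfl | hx'
      · exact g2 x d3
      · exact g5 x hx'

-- the main DFS characterisation, by induction on the fuel
theorem pvDfs_main (adj : PySem.Dict (Int × Int) (List (Int × Int))) (U : List (Int × Int))
    (hU : pvGood adj U) :
    ∀ (fuel : Nat) (xy : Int × Int) (vis : List (Int × Int)),
      vis.Nodup → xy ∈ U → xy ∉ vis →
      (U.filter (fun u => u ∉ vis)).length < fuel →
      (pvDfs adj fuel xy vis).Nodup ∧
      (∀ v ∈ vis, v ∈ pvDfs adj fuel xy vis) ∧
      xy ∈ pvDfs adj fuel xy vis ∧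
      (∀ w ∈ pvDfs adj fuel xy vis, w ∈ vis ∨ pvRA adj vis xy w) ∧
      (∀ a ∈ pvDfs adj fuel xy vis, a ∉ vis → ∀ b ∈ adj.getD a [], b ∈ pvDfs adj fuel xy vis) := by
  intro fuel
  induction fuel with
  | zero =>
    intro xy vis _ _ _ h4
    omega
  | succ fuel ihf =>
    intro xy vis h1 h2 h3 h4
    have hadd : PySem.Set.add vis xy = vis ++ [xy] := PySem.Set.add_of_not_mem h3
    have heq : pvDfs adj (fuel + 1) xy vis
        = (adj.getD xy []).foldl
            (fun vis uv => if uv ∈ vis then vis else pvDfs adj fuel uv vis)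
            (PySem.Set.add vis xy) := rfl
    have h1' : (vis ++ [xy]).Nodup :=
      (List.perm_append_singleton xy vis).nodup_iff.mpr (List.nodup_cons.mpr ⟨h3, h1⟩)
    have h2' : ∀ x ∈ vis, x ∈ vis ++ [xy] := fun x hx => List.mem_append_left _ hx
    have h3' : xy ∈ vis ++ [xy] := List.mem_append_right _ (List.mem_singleton.mpr rfl)
    have h4' : ∀ w ∈ vis ++ [xy], w ∈ vis ∨ pvRA adj vis xy w := by
      intro w hw
      rcases List.mem_append.mp hw with hw | hw
      · exact Or.inl hw
      · rw [List.mem_singleton] at hw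
        exact Or.inr (hw ▸ Relation.ReflTransGen.refl)
    have h5' : ∀ a ∈ vis ++ [xy], a ∉ vis → a = xy ∨ ∀ b ∈ adj.getD a [], b ∈ vis ++ [xy] := by
      intro a ha hav
      rcases List.mem_append.mp ha with ha | ha
      · exact absurd ha hav
      · exact Or.inl (List.mem_singleton.mp ha)
    have h6' : (U.filter (fun u => u ∉ vis ++ [xy])).length < fuel := by
      have hlt := pv_filter_lt U vis (vis ++ [xy]) h2' xy h2 h3 h3'
      omega
    obtain ⟨f1, f2, f3, f4, f5, f6⟩ := pvDfs_fold adj U hU fuel ihf xy vis h2 h3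
      (adj.getD xy []) (vis ++ [xy]) (fun uv huv => huv) h1' h2' h3' h4' h5' h6'
    rw [heq, hadd]
    refine ⟨f1, fun v hv => f2 v (h2' v hv), f2 xy h3', f3, ?_⟩
    intro a ha hav b hb
    rcases f4 a ha hav with rfl | hs
    · exact f5 b hb
    · exact hs b hb

-- nodes along an avoiding path stay outside vis
theorem pvRA_target (adj : PySem.Dict (Int × Int) (List (Int × Int))) (vis : List (Int × Int))
    (x w : Int × Int) (h : pvRA adj vis x w) (hx : x ∉ vis) : w ∉ vis := by
  induction h with
  | refl => exact hx
  | tail _ step _ => exact step.2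

-- DFS completeness from the closure property
theorem pvDfs_complete (adj : PySem.Dict (Int × Int) (List (Int × Int))) (vis : List (Int × Int))
    (xy : Int × Int) (W : List (Int × Int)) (hxy : xy ∈ W) (hxyv : xy ∉ vis)
    (hcl : ∀ a ∈ W, a ∉ vis → ∀ b ∈ adj.getD a [], b ∈ W) :
    ∀ w, pvRA adj vis xy w → w ∈ W := by
  intro w hw
  induction hw with
  | refl => exact hxy
  | @tail a b p step ih =>
    exact hcl a ih (pvRA_target adj vis xy a p hxyv) b step.1

-- top-level DFS characterisation (empty visited set)
theorem pvDfs_top (adj : PySem.Dict (Int × Int) (List (Int × Int))) (U : List (Int × Int))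
    (hU : pvGood adj U) (fuel : Nat) (xy : Int × Int) (hxy : xy ∈ U) (hfuel : U.length < fuel) :
    (pvDfs adj fuel xy PySem.Set.empty).Nodup ∧
    (∀ w, w ∈ pvDfs adj fuel xy PySem.Set.empty ↔ pvRTG adj xy w) := by
  have hbound : (U.filter (fun u => u ∉ (PySem.Set.empty : List (Int × Int)))).length < fuel := by
    have : U.filter (fun u => u ∉ (PySem.Set.empty : List (Int × Int))) = U := by
      simp [PySem.Set.empty]
    rw [this]
    exact hfuel
  obtain ⟨m1, m2, m3, m4, m5⟩ := pvDfs_main adj U hU fuel xy PySem.Set.empty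
    List.nodup_nil hxy (List.not_mem_nil) hbound
  refine ⟨m1, fun w => ?_⟩
  constructor
  · intro hw
    rcases m4 w hw with hwv | hra
    · exact absurd hwv (List.not_mem_nil)
    · exact hra.mono (fun a b hab => hab.1)
  · intro hp
    refine pvDfs_complete adj PySem.Set.empty xy _ m3 (List.not_mem_nil) m5 w ?_
    exact hp.mono (fun a b hab => ⟨hab, List.not_mem_nil⟩)

-- the inner BFS foldl over one adjacency list
theorem pvStep_fold (reach : List (Int × Int)) :
    ∀ (l : List (Int × Int)) (st : PySem.Set (Int × Int) × List (Int × Int)),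
      st.1.Nodup → (∀ w, w ∈ st.2 ↔ w ∈ st.1 ∧ w ∉ reach) → (∀ x ∈ reach, x ∈ st.1) →
      ((l.foldl (fun st t => if t ∈ st.1 then st else (PySem.Set.add st.1 t, st.2 ++ [t])) st).1.Nodup ∧
       (∀ w, w ∈ (l.foldl (fun st t => if t ∈ st.1 then st else (PySem.Set.add st.1 t, st.2 ++ [t])) st).2 ↔
          w ∈ (l.foldl (fun st t => if t ∈ st.1 then st else (PySem.Set.add st.1 t, st.2 ++ [t])) st).1 ∧ w ∉ reach) ∧
       (∀ x ∈ reach, x ∈ (l.foldl (fun st t => if t ∈ st.1 then st else (PySem.Set.add st.1 t, st.2 ++ [t])) st).1) ∧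
       (∀ w, w ∈ (l.foldl (fun st t => if t ∈ st.1 then st else (PySem.Set.add st.1 t, st.2 ++ [t])) st).1 ↔
          w ∈ st.1 ∨ w ∈ l)) := by
  intro l
  induction l with
  | nil =>
    intro st h1 h2 h3
    exact ⟨h1, h2, h3, fun w => by simp⟩
  | cons t l ih =>
    intro st h1 h2 h3
    simp only [List.foldl_cons]
    by_cases ht : t ∈ st.1
    · rw [if_pos ht]
      obtain ⟨g1, g2, g3, g4⟩ := ih st h1 h2 h3
      refine ⟨g1, g2, g3, fun w => ?_⟩
      rw [g4 w]
      simp only [List.mem_cons]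
      constructor
      · rintro (hw | hw)
        · exact Or.inl hw
        · exact Or.inr (Or.inr hw)
      · rintro (hw | hw | hw)
        · exact Or.inl hw
        · exact Or.inl (hw ▸ ht)
        · exact Or.inr hw
    · rw [if_neg ht]
      have hnd : (PySem.Set.add st.1 t).Nodup := PySem.Set.nodup_add st.1 t h1
      have hch : ∀ w, w ∈ st.2 ++ [t] ↔ w ∈ PySem.Set.add st.1 t ∧ w ∉ reach := by
        intro w
        rw [List.mem_append, PySem.Set.mem_add, h2 w, List.mem_singleton]
        constructor
        · rintro (⟨hw1, hw2⟩ | rfl)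
          · exact ⟨Or.inl hw1, hw2⟩
          · exact ⟨Or.inr rfl, fun hc => ht (h3 w hc)⟩
        · rintro ⟨hw1 | rfl, hw3⟩
          · exact Or.inl ⟨hw1, hw3⟩
          · exact Or.inr rfl
      have hre : ∀ x ∈ reach, x ∈ PySem.Set.add st.1 t := by
        intro x hx
        rw [PySem.Set.mem_add]
        exact Or.inl (h3 x hx)
      obtain ⟨g1, g2, g3, g4⟩ := ih (PySem.Set.add st.1 t, st.2 ++ [t]) hnd hch hre
      refine ⟨g1, g2, g3, fun w => ?_⟩
      rw [g4 w]
      simp only [PySem.Set.mem_add, List.mem_cons]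
      tauto

-- one whole round of the while loop
theorem pvBfsRound_spec (nbr : PySem.Dict (Int × Int) (List (Int × Int)))
    (frontier : List (Int × Int)) (reach : PySem.Set (Int × Int)) (hnd : reach.Nodup) :
    ((pvBfsRound nbr frontier reach).1.Nodup ∧
     (∀ x ∈ reach, x ∈ (pvBfsRound nbr frontier reach).1) ∧
     (∀ w, w ∈ (pvBfsRound nbr frontier reach).1 ↔
        w ∈ reach ∨ ∃ r ∈ frontier, w ∈ nbr.getD r []) ∧
     (∀ w, w ∈ (pvBfsRound nbr frontier reach).2 ↔
        w ∈ (pvBfsRound nbr frontier reach).1 ∧ w ∉ reach)) := by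
  have aux : ∀ (fr : List (Int × Int)) (st : PySem.Set (Int × Int) × List (Int × Int)),
      st.1.Nodup → (∀ w, w ∈ st.2 ↔ w ∈ st.1 ∧ w ∉ reach) → (∀ x ∈ reach, x ∈ st.1) →
      ((fr.foldl (fun st r => (nbr.getD r []).foldl
          (fun st t => if t ∈ st.1 then st else (PySem.Set.add st.1 t, st.2 ++ [t])) st) st).1.Nodup ∧
       (∀ w, w ∈ (fr.foldl (fun st r => (nbr.getD r []).foldl
          (fun st t => if t ∈ st.1 then st else (PySem.Set.add st.1 t, st.2 ++ [t])) st) st).2 ↔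
          w ∈ (fr.foldl (fun st r => (nbr.getD r []).foldl
          (fun st t => if t ∈ st.1 then st else (PySem.Set.add st.1 t, st.2 ++ [t])) st) st).1 ∧ w ∉ reach) ∧
       (∀ x ∈ reach, x ∈ (fr.foldl (fun st r => (nbr.getD r []).foldl
          (fun st t => if t ∈ st.1 then st else (PySem.Set.add st.1 t, st.2 ++ [t])) st) st).1) ∧
       (∀ w, w ∈ (fr.foldl (fun st r => (nbr.getD r []).foldl
          (fun st t => if t ∈ st.1 then st else (PySem.Set.add st.1 t, st.2 ++ [t])) st) st).1 ↔
          w ∈ st.1 ∨ ∃ r ∈ fr, w ∈ nbr.getD r [])) := by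
    intro fr
    induction fr with
    | nil =>
      intro st h1 h2 h3
      exact ⟨h1, h2, h3, fun w => by simp⟩
    | cons r fr ih =>
      intro st h1 h2 h3
      simp only [List.foldl_cons]
      obtain ⟨g1, g2, g3, g4⟩ := pvStep_fold reach (nbr.getD r []) st h1 h2 h3
      obtain ⟨k1, k2, k3, k4⟩ := ih _ g1 g2 g3
      refine ⟨k1, k2, k3, fun w => ?_⟩
      rw [k4 w, g4 w]
      simp only [List.mem_cons]
      constructor
      · rintro ((hw | hw) | ⟨r', hr', hw⟩)
        · exact Or.inl hw
        · exact Or.inr ⟨r, Or.inl rfl, hw⟩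
        · exact Or.inr ⟨r', Or.inr hr', hw⟩
      · rintro (hw | ⟨r', hr' | hr', hw⟩)
        · exact Or.inl (Or.inl hw)
        · exact Or.inl (Or.inr (hr' ▸ hw))
        · exact Or.inr ⟨r', hr', hw⟩
  have h2 : ∀ w : Int × Int, w ∈ ([] : List (Int × Int)) ↔ w ∈ reach ∧ w ∉ reach := by simp
  have h3 : ∀ x ∈ reach, x ∈ reach := fun x hx => hx
  obtain ⟨g1, g2, g3, g4⟩ := aux frontier (reach, []) hnd h2 h3
  exact ⟨g1, g3, g4, g2⟩

-- the BFS loop characterisation, by induction on the fuel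
theorem pvBfs_main (nbr : PySem.Dict (Int × Int) (List (Int × Int))) (U : List (Int × Int))
    (hU : pvGood nbr U) :
    ∀ (fuel : Nat) (frontier : List (Int × Int)) (reach : PySem.Set (Int × Int)),
      reach.Nodup → (∀ r ∈ frontier, r ∈ reach) →
      (∀ a ∈ reach, a ∉ frontier → ∀ b ∈ nbr.getD a [], b ∈ reach) →
      ((U.filter (fun u => u ∉ reach)).length < fuel ∨ frontier = []) →
      (pvBfs nbr fuel frontier reach).Nodup ∧
      (∀ w, w ∈ pvBfs nbr fuel frontier reach ↔
        w ∈ reach ∨ ∃ r ∈ frontier, pvRTG nbr r w) := by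
  intro fuel
  induction fuel with
  | zero =>
    intro frontier reach h1 h2 h3 h4
    rcases h4 with h4 | rfl
    · omega
    · refine ⟨h1, fun w => ?_⟩
      simp [pvBfs]
  | succ fuel ih =>
    intro frontier reach h1 h2 h3 h4
    match frontier, h2, h4 with
    | [], _, _ =>
      refine ⟨h1, fun w => ?_⟩
      simp [pvBfs]
    | f :: fs, h2, h4 =>
      have h4' : (U.filter (fun u => u ∉ reach)).length < fuel + 1 := by
        rcases h4 with h4 | h4
        · exact h4
        · cases h4
      obtain ⟨r1, r2, r3, r4⟩ := pvBfsRound_spec nbr (f :: fs) reach h1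
      set st := pvBfsRound nbr (f :: fs) reach with hst
      have hcl' : ∀ a ∈ st.1, a ∉ st.2 → ∀ b ∈ nbr.getD a [], b ∈ st.1 := by
        intro a ha hans b hb
        have hareach : a ∈ reach := by
          by_contra har
          exact hans ((r4 a).mpr ⟨ha, har⟩)
        by_cases hafr : a ∈ f :: fs
        · exact (r3 b).mpr (Or.inr ⟨a, hafr, hb⟩)
        · exact r2 b (h3 a hareach hafr b hb)
      have hfuel' : (U.filter (fun u => u ∉ st.1)).length < fuel ∨ st.2 = [] := by
        by_cases hst2 : st.2 = []
        · exact Or.inr hst2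
        · left
          obtain ⟨x, hx⟩ := List.exists_mem_of_ne_nil st.2 hst2
          obtain ⟨hx1, hx2⟩ := (r4 x).mp hx
          have hxU : x ∈ U := by
            rcases (r3 x).mp hx1 with hxr | ⟨r, _, hxr⟩
            · exact absurd hxr hx2
            · exact hU r x hxr
          exact lt_of_lt_of_le (pv_filter_lt U reach st.1 r2 x hxU hx2 hx1)
            (Nat.lt_succ_iff.mp h4')
      have hsub : ∀ r ∈ st.2, r ∈ st.1 := fun r hr => ((r4 r).mp hr).1
      obtain ⟨k1, k2⟩ := ih st.2 st.1 r1 hsub hcl' hfuel'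
      have heq : pvBfs nbr (fuel + 1) (f :: fs) reach = pvBfs nbr fuel st.2 st.1 := by
        simp [pvBfs, hst]
      rw [heq]
      refine ⟨k1, fun w => ?_⟩
      rw [k2 w]
      have aux : ∀ b, Relation.ReflTransGen (fun a b => b ∈ nbr.getD a []) b w →
          b ∈ st.1 → (w ∈ st.1 ∨ ∃ r' ∈ st.2, pvRTG nbr r' w) := by
        intro b hb
        induction hb using Relation.ReflTransGen.head_induction_on with
        | refl => intro h; exact Or.inl h
        | @head a c step rest ihp =>
          intro ha
          by_cases hc : a ∈ st.2
          · exact Or.inr ⟨a, hc, Relation.ReflTransGen.head step rest⟩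
          · exact ihp (hcl' a ha hc c step)
      constructor
      · rintro (hw | ⟨r', hr', hp⟩)
        · rcases (r3 w).mp hw with hwr | ⟨r, hrfr, hw'⟩
          · exact Or.inl hwr
          · exact Or.inr ⟨r, hrfr, Relation.ReflTransGen.single hw'⟩
        · obtain ⟨hr1, hr2⟩ := (r4 r').mp hr'
          rcases (r3 r').mp hr1 with hrr | ⟨r, hrfr, hr''⟩
          · exact absurd hrr hr2
          · exact Or.inr ⟨r, hrfr, Relation.ReflTransGen.head hr'' hp⟩
      · rintro (hw | ⟨r, hrfr, hp⟩)
        · exact Or.inl (r2 w hw)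
        · exact aux r hp (r2 r (h2 r hrfr))

-- top-level BFS characterisation (singleton start)
theorem pvBfs_top (nbr : PySem.Dict (Int × Int) (List (Int × Int))) (U : List (Int × Int))
    (hU : pvGood nbr U) (fuel : Nat) (s : Int × Int) (hfuel : U.length < fuel) :
    (pvBfs nbr fuel [s] (PySem.Set.add PySem.Set.empty s)).Nodup ∧
    (∀ w, w ∈ pvBfs nbr fuel [s] (PySem.Set.add PySem.Set.empty s) ↔ pvRTG nbr s w) := by
  have hadd : PySem.Set.add PySem.Set.empty s = [s] := by simp [PySem.Set.add, PySem.Set.empty]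
  rw [hadd]
  have h1 : ([s] : List (Int × Int)).Nodup := by simp
  have h2 : ∀ r ∈ ([s] : List (Int × Int)), r ∈ ([s] : List (Int × Int)) := fun r hr => hr
  have h3 : ∀ a ∈ ([s] : List (Int × Int)), a ∉ ([s] : List (Int × Int)) →
      ∀ b ∈ nbr.getD a [], b ∈ ([s] : List (Int × Int)) := by
    intro a ha hna
    exact absurd ha hna
  have h4 : ((U.filter (fun u => u ∉ ([s] : List (Int × Int)))).length < fuel ∨
      ([s] : List (Int × Int)) = []) := by
    left
    calc (U.filter (fun u => u ∉ ([s] : List (Int × Int)))).length ≤ U.length :=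
          List.length_filter_le _ _
      _ < fuel := hfuel
  obtain ⟨k1, k2⟩ := pvBfs_main nbr U hU fuel [s] [s] h1 h2 h3 h4
  refine ⟨k1, fun w => ?_⟩
  rw [k2 w]
  constructor
  · rintro (hw | ⟨r, hr, hp⟩)
    · rw [List.mem_singleton] at hw
      exact hw ▸ Relation.ReflTransGen.refl
    · rw [List.mem_singleton] at hr
      exact hr ▸ hp
  · intro hp
    exact Or.inr ⟨s, List.mem_singleton.mpr rfl, hp⟩

-- getD of A's inner foldl (one source cow)
theorem pvAdjA_inner (cows : List (Int × Int × Int)) :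
    ∀ (ci : Int × Int × Int) (d : PySem.Dict (Int × Int) (List (Int × Int))) (k : Int × Int),
      (cows.foldl (fun adj cj =>
        if ci.2.2 ^ 2 ≥ (ci.1 - cj.1) ^ 2 + (ci.2.1 - cj.2.1) ^ 2 then
          adj.insert (ci.1, ci.2.1) (adj.getD (ci.1, ci.2.1) [] ++ [(cj.1, cj.2.1)])
        else adj) d).getD k []
      = d.getD k [] ++
        (if k = (ci.1, ci.2.1) then
          (cows.filter (fun cj =>
            ci.2.2 ^ 2 ≥ (ci.1 - cj.1) ^ 2 + (ci.2.1 - cj.2.1) ^ 2)).map (fun cj => (cj.1, cj.2.1))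
        else []) := by
  intro ci d k
  induction cows generalizing d with
  | nil => simp
  | cons cj rest ih =>
    simp only [List.foldl_cons]
    by_cases hc : ci.2.2 ^ 2 ≥ (ci.1 - cj.1) ^ 2 + (ci.2.1 - cj.2.1) ^ 2
    · rw [if_pos hc, ih, PySem.Dict.getD_insert]
      by_cases hk : k = (ci.1, ci.2.1)
      · simp [hk, hc, List.append_assoc]
      · simp [hk]
    · rw [if_neg hc, ih]
      by_cases hk : k = (ci.1, ci.2.1)
      · simp [hk, hc]
      · simp [hk]

-- getD of A's outer foldl, for an arbitrary starting dict
theorem pvAdjA_getD_aux (cows : List (Int × Int × Int)) :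
    ∀ (l : List (Int × Int × Int)) (d : PySem.Dict (Int × Int) (List (Int × Int))) (k : Int × Int),
      (l.foldl (fun adj ci =>
        cows.foldl (fun adj cj =>
          if ci.2.2 ^ 2 ≥ (ci.1 - cj.1) ^ 2 + (ci.2.1 - cj.2.1) ^ 2 then
            adj.insert (ci.1, ci.2.1) (adj.getD (ci.1, ci.2.1) [] ++ [(cj.1, cj.2.1)])
          else adj) adj) d).getD k []
      = d.getD k [] ++
        (l.map (fun ci =>
          if k = (ci.1, ci.2.1) then
            (cows.filter (fun cj =>
              ci.2.2 ^ 2 ≥ (ci.1 - cj.1) ^ 2 + (ci.2.1 - cj.2.1) ^ 2)).map (fun cj => (cj.1, cj.2.1))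
          else [])).flatten := by
  intro l
  induction l with
  | nil => simp
  | cons ci rest ih =>
    intro d k
    simp only [List.foldl_cons, List.map_cons, List.flatten_cons]
    rw [ih, pvAdjA_inner cows ci d k, List.append_assoc]

-- getD of A's whole adjacency build
theorem pvAdjA_getD (cows : List (Int × Int × Int)) (k : Int × Int) :
    (pvAdjA cows).getD k []
    = (cows.map (fun ci =>
        if k = (ci.1, ci.2.1) then
          (cows.filter (fun cj =>
            ci.2.2 ^ 2 ≥ (ci.1 - cj.1) ^ 2 + (ci.2.1 - cj.2.1) ^ 2)).map (fun cj => (cj.1, cj.2.1))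
        else [])).flatten := by
  unfold pvAdjA
  rw [pvAdjA_getD_aux cows cows PySem.Dict.empty k]
  simp [PySem.Dict.getD_empty]

-- getD of B's adjacency build
theorem pvNbrB_getD (cows : List (Int × Int × Int)) (nodes : List (Int × Int)) (k : Int × Int) :
    (pvNbrB cows nodes).getD k []
    = (cows.map (fun c =>
        if k = (c.1, c.2.1) then
          nodes.filter (fun q => c.2.2 * c.2.2 ≥ (c.1 - q.1) ^ 2 + (c.2.1 - q.2) ^ 2)
        else [])).flatten := by
  unfold pvNbrB
  suffices h : ∀ (l : List (Int × Int × Int)) (d : PySem.Dict (Int × Int) (List (Int × Int))),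
      (l.foldl (fun nbr c =>
        nbr.insert (c.1, c.2.1)
          (nbr.getD (c.1, c.2.1) [] ++
            nodes.filter (fun q => c.2.2 * c.2.2 ≥ (c.1 - q.1) ^ 2 + (c.2.1 - q.2) ^ 2))) d).getD k []
      = d.getD k [] ++
        (l.map (fun c =>
          if k = (c.1, c.2.1) then
            nodes.filter (fun q => c.2.2 * c.2.2 ≥ (c.1 - q.1) ^ 2 + (c.2.1 - q.2) ^ 2)
          else [])).flatten by
    rw [h cows PySem.Dict.empty]
    simp [PySem.Dict.getD_empty]
  intro l
  induction l with
  | nil => simp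
  | cons c rest ih =>
    intro d
    simp only [List.foldl_cons, List.map_cons, List.flatten_cons]
    rw [ih, PySem.Dict.getD_insert]
    by_cases hk : k = (c.1, c.2.1)
    · simp only [hk, if_true]
      rw [List.append_assoc]
    · simp [hk]

-- the two adjacency structures give the same edges
theorem pv_edge_iff (cows : List (Int × Int × Int)) (k b : Int × Int) :
    b ∈ (pvAdjA cows).getD k [] ↔
    b ∈ (pvNbrB cows (PySem.List.dedup (cows.map (fun c => (c.1, c.2.1))))).getD k [] := by
  rw [pvAdjA_getD, pvNbrB_getD]
  simp only [List.mem_flatten, List.mem_map]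
  constructor
  · rintro ⟨l, ⟨ci, hci, rfl⟩, hb⟩
    by_cases hk : k = (ci.1, ci.2.1)
    · rw [if_pos hk] at hb
      rcases List.mem_map.mp hb with ⟨cj, hcj, rfl⟩
      rcases List.mem_filter.mp hcj with ⟨hcjmem, hcond⟩
      refine ⟨_, ⟨ci, hci, rfl⟩, ?_⟩
      rw [if_pos hk]
      apply List.mem_filter.mpr
      refine ⟨?_, ?_⟩
      · rw [PySem.List.mem_dedup]
        exact List.mem_map.mpr ⟨cj, hcjmem, rfl⟩
      · simp only [decide_eq_true_eq] at hcond ⊢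
        calc (ci.1 - cj.1) ^ 2 + (ci.2.1 - cj.2.1) ^ 2 ≤ ci.2.2 ^ 2 := hcond
          _ = ci.2.2 * ci.2.2 := by ring
    · rw [if_neg hk] at hb
      cases hb
  · rintro ⟨l, ⟨ci, hci, rfl⟩, hb⟩
    by_cases hk : k = (ci.1, ci.2.1)
    · rw [if_pos hk] at hb
      rcases List.mem_filter.mp hb with ⟨hbmem, hcond⟩
      rw [PySem.List.mem_dedup] at hbmem
      rcases List.mem_map.mp hbmem with ⟨cj, hcj, rfl⟩
      refine ⟨_, ⟨ci, hci, rfl⟩, ?_⟩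
      rw [if_pos hk]
      apply List.mem_map.mpr
      refine ⟨cj, List.mem_filter.mpr ⟨hcj, ?_⟩, rfl⟩
      simp only [decide_eq_true_eq] at hcond ⊢
      calc (ci.1 - cj.1) ^ 2 + (ci.2.1 - cj.2.1) ^ 2 ≤ ci.2.2 * ci.2.2 := hcond
        _ = ci.2.2 ^ 2 := by ring
    · rw [if_neg hk] at hb
      cases hb

theorem pv_rtg_iff (cows : List (Int × Int × Int)) (s w : Int × Int) :
    pvRTG (pvAdjA cows) s w ↔
    pvRTG (pvNbrB cows (PySem.List.dedup (cows.map (fun c => (c.1, c.2.1))))) s w := by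
  unfold pvRTG
  constructor
  · intro h
    exact h.mono (fun a b hab => (pv_edge_iff cows a b).mp hab)
  · intro h
    exact h.mono (fun a b hab => (pv_edge_iff cows a b).mpr hab)

theorem pvGoodA (cows : List (Int × Int × Int)) :
    pvGood (pvAdjA cows) (PySem.List.dedup (cows.map (fun c => (c.1, c.2.1)))) := by
  intro a b hb
  rw [pvAdjA_getD] at hb
  simp only [List.mem_flatten, List.mem_map] at hb
  rcases hb with ⟨l, ⟨ci, hci, rfl⟩, hb⟩
  by_cases hk : a = (ci.1, ci.2.1)
  · rw [if_pos hk] at hb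
    rcases List.mem_map.mp hb with ⟨cj, hcj, rfl⟩
    rw [PySem.List.mem_dedup]
    exact List.mem_map.mpr ⟨cj, (List.mem_filter.mp hcj).1, rfl⟩
  · rw [if_neg hk] at hb
    cases hb

theorem pvGoodB (cows : List (Int × Int × Int)) :
    pvGood (pvNbrB cows (PySem.List.dedup (cows.map (fun c => (c.1, c.2.1)))))
      (PySem.List.dedup (cows.map (fun c => (c.1, c.2.1)))) := by
  intro a b hb
  rw [pvNbrB_getD] at hb
  simp only [List.mem_flatten, List.mem_map] at hb
  rcases hb with ⟨l, ⟨ci, hci, rfl⟩, hb⟩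
  by_cases hk : a = (ci.1, ci.2.1)
  · rw [if_pos hk] at hb
    exact (List.mem_filter.mp hb).1
  · rw [if_neg hk] at hb
    cases hb

-- foldl-max toolbox
theorem pv_le_foldl_max (f : (Int × Int) → Int) :
    ∀ (l : List (Int × Int)) (a : Int), a ≤ l.foldl (fun r x => max r (f x)) a := by
  intro l
  induction l with
  | nil => intro a; simp
  | cons x l ih =>
    intro a
    simp only [List.foldl_cons]
    exact le_trans (le_max_left a (f x)) (ih (max a (f x)))

theorem pv_mem_le_foldl_max (f : (Int × Int) → Int) :
    ∀ (l : List (Int × Int)) (a : Int) (x : Int × Int), x ∈ l →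
      f x ≤ l.foldl (fun r x => max r (f x)) a := by
  intro l
  induction l with
  | nil => intro a x hx; cases hx
  | cons y l ih =>
    intro a x hx
    simp only [List.foldl_cons]
    rcases List.mem_cons.mp hx with rfl | hx'
    · exact le_trans (le_max_right a (f x)) (pv_le_foldl_max f l (max a (f x)))
    · exact ih (max a (f y)) x hx'

theorem pv_foldl_max_le (f : (Int × Int) → Int) :
    ∀ (l : List (Int × Int)) (a c : Int), a ≤ c → (∀ x ∈ l, f x ≤ c) →
      l.foldl (fun r x => max r (f x)) a ≤ c := by
  intro l
  induction l with
  | nil => intro a c hac _; simpa using hac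
  | cons x l ih =>
    intro a c hac hall
    simp only [List.foldl_cons]
    exact ih (max a (f x)) c (max_le hac (hall x List.mem_cons_self)) fun y hy => hall y (List.mem_cons_of_mem x hy)

theorem pv_foldl_max_congr (f : (Int × Int) → Int) (l₁ l₂ : List (Int × Int)) (a : Int)
    (h : ∀ x, x ∈ l₁ ↔ x ∈ l₂) :
    l₁.foldl (fun r x => max r (f x)) a = l₂.foldl (fun r x => max r (f x)) a := by
  apply le_antisymm
  · apply pv_foldl_max_le
    · exact pv_le_foldl_max f l₂ a
    · intro x hx
      exact pv_mem_le_foldl_max f l₂ a x ((h x).mp hx)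
  · apply pv_foldl_max_le
    · exact pv_le_foldl_max f l₁ a
    · intro x hx
      exact pv_mem_le_foldl_max f l₁ a x ((h x).mpr hx)

theorem pv_foldl_max_funext (f g : (Int × Int) → Int) :
    ∀ (l : List (Int × Int)) (a : Int), (∀ x ∈ l, f x = g x) →
      l.foldl (fun r x => max r (f x)) a = l.foldl (fun r x => max r (g x)) a := by
  intro l
  induction l with
  | nil => intro a _; rfl
  | cons x l ih =>
    intro a hfg
    simp only [List.foldl_cons]
    rw [hfg x List.mem_cons_self]
    exact ih (max a (g x)) fun y hy => hfg y (List.mem_cons_of_mem x hy)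

-- the two per-start set sizes agree
set_option maxHeartbeats 1000000 in
theorem pv_len_eq (cows : List (Int × Int × Int)) (s : Int × Int)
    (hs : s ∈ PySem.List.dedup (cows.map (fun c => (c.1, c.2.1)))) :
    PySem.List.len (pvDfs (pvAdjA cows) (cows.length + 1) s PySem.Set.empty)
    = PySem.List.len
        (pvBfs (pvNbrB cows (PySem.List.dedup (cows.map (fun c => (c.1, c.2.1)))))
          ((PySem.List.dedup (cows.map (fun c => (c.1, c.2.1)))).length + 1) [s]
          (PySem.Set.add PySem.Set.empty s)) := by
  have hlen : (PySem.List.dedup (cows.map (fun c => (c.1, c.2.1)))).length < cows.length + 1 := by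
    have h1 : (PySem.List.dedup (cows.map (fun c => (c.1, c.2.1)))).length
        ≤ (cows.map (fun c => (c.1, c.2.1))).length := by
      rw [PySem.List.dedup_eq_ofList]
      exact PySem.Set.length_ofList_le _
    simp only [List.length_map] at h1
    omega
  obtain ⟨na, ma⟩ := pvDfs_top (pvAdjA cows) (PySem.List.dedup (cows.map (fun c => (c.1, c.2.1))))
    (pvGoodA cows) (cows.length + 1) s hs hlen
  obtain ⟨nb', mb⟩ := pvBfs_top
    (pvNbrB cows (PySem.List.dedup (cows.map (fun c => (c.1, c.2.1)))))
    (PySem.List.dedup (cows.map (fun c => (c.1, c.2.1))))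
    (pvGoodB cows) ((PySem.List.dedup (cows.map (fun c => (c.1, c.2.1)))).length + 1) s
    (Nat.lt_succ_self _)
  have hmem : ∀ w, w ∈ pvDfs (pvAdjA cows) (cows.length + 1) s PySem.Set.empty ↔
      w ∈ pvBfs (pvNbrB cows (PySem.List.dedup (cows.map (fun c => (c.1, c.2.1)))))
        ((PySem.List.dedup (cows.map (fun c => (c.1, c.2.1)))).length + 1) [s]
        (PySem.Set.add PySem.Set.empty s) := by
    intro w
    rw [ma w, mb w]
    exact pv_rtg_iff cows s w
  have hperm := (List.perm_ext_iff_of_nodup na nb').mpr hmem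
  rw [PySem.List.len_eq, PySem.List.len_eq, hperm.length_eq]

-- ===== VERDICT (by name: the statement is the Claim_ definition above) =====
set_option maxHeartbeats 1000000 in
theorem solve_spec : Claim_equal_solve := by
  unfold Claim_equal_solve
  intro inp _
  unfold Spec_solve
  simp only [solve, solve_alt]
  rw [show (inp.foldl (fun res c =>
      max res (PySem.List.len (pvDfs (pvAdjA inp) (inp.length + 1) (c.1, c.2.1) PySem.Set.empty))) 0)
    = ((inp.map (fun c => (c.1, c.2.1))).foldl (fun r s =>
      max r (PySem.List.len (pvDfs (pvAdjA inp) (inp.length + 1) s PySem.Set.empty))) 0) from by rw [List.foldl_map]]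
  rw [pv_foldl_max_congr
    (fun s => PySem.List.len (pvDfs (pvAdjA inp) (inp.length + 1) s PySem.Set.empty))
    (inp.map (fun c => (c.1, c.2.1)))
    (PySem.List.dedup (inp.map (fun c => (c.1, c.2.1)))) 0
    (fun x => (PySem.List.mem_dedup _ x).symm)]
  exact pv_foldl_max_funext
    (fun s => PySem.List.len (pvDfs (pvAdjA inp) (inp.length + 1) s PySem.Set.empty))
    (fun s => PySem.List.len
      (pvBfs (pvNbrB inp (PySem.List.dedup (inp.map (fun c => (c.1, c.2.1)))))
        ((PySem.List.dedup (inp.map (fun c => (c.1, c.2.1)))).length + 1) [s]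
        (PySem.Set.add PySem.Set.empty s)))
    (PySem.List.dedup (inp.map (fun c => (c.1, c.2.1)))) 0
    (fun s hsin => pv_len_eq inp s hsin)
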